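-- pv_equiv track=rewrite | github.com/ColeAbell/CaeserCipher | CaeserCipher.py | create_code_with_keyword
-- ===== SOURCE A (Python) =====
-- alph = 'abcdefghijklmnopqrstuvwxyz'
--
-- def create_code_with_keyword(message, keyword):
-- 	key_list = []
-- 	char_index = []
-- 	words_indexs = []
-- 	char2_index = []
-- 	shifted_index = []
-- 	solved_index = []
-- 	solved_list = []
-- 	final_list = []
-- 	r = 0
-- 	for el in keyword:
-- 		key_list.append(alph.find(el))
-- 	for word in message.split(' '):
-- 		for el in word:
-- 			if el in alph:
-- 				char_index.append(alph.find(el))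
-- 			else:
-- 				char_index.append(el)
-- 		words_indexs.append(char_index)
-- 		char_index = []
-- 	key_list = 200*key_list
-- 	for i in words_indexs:
-- 		for el in i:
-- 			if isinstance(el, int) and el + key_list[r] <= len(alph) - 1:
-- 				char2_index.append(el + key_list[r])
-- 				r+=1
-- 			elif isinstance(el, int) and el + key_list[r] > len(alph) - 1:
-- 				char2_index.append(((el + key_list[r]) - (len(alph))) + 0)
-- 				r+=1
-- 			else:
-- 				char2_index.append(el)
--
-- 		shifted_index.append(char2_index)
-- 		char2_index = []
-- 	for lst in shifted_index:
-- 		for i in lst: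
-- 			if isinstance(i, int):
-- 				solved_index.append(alph[i])
-- 			elif i == 0:
-- 				solved_index.append(alph[i])
-- 			else:
-- 				solved_index.append(i)
-- 		solved_list.append(solved_index)
-- 		solved_index = []
-- 	for i in solved_list:
-- 		final_list.append(''.join(i))
-- 	return ' '.join(final_list)
-- ===== SOURCE B (Python) =====
-- alph = 'abcdefghijklmnopqrstuvwxyz'
--
-- def create_code_with_keyword(message, keyword):
--     out = []
--     r = 0
--     for c in message:
--         if c in alph:
--             k = alph.find(keyword[r % len(keyword)])
--             out.append(alph[(alph.find(c) + k) % 26])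
--             r += 1
--         else:
--             out.append(c)
--     return ''.join(out)
-- ===== Notes on version B (the rewrite author's own statement) =====
-- stated objective: simpler
-- what changed: Replaces A's five-stage pipeline (split into words, encode to index lists, shift with a 200x-repeated key list, decode, rejoin) by a single pass over the message characters with a key counter taken modulo len(keyword) and the shift reduced mod 26.
import Mathlib
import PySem

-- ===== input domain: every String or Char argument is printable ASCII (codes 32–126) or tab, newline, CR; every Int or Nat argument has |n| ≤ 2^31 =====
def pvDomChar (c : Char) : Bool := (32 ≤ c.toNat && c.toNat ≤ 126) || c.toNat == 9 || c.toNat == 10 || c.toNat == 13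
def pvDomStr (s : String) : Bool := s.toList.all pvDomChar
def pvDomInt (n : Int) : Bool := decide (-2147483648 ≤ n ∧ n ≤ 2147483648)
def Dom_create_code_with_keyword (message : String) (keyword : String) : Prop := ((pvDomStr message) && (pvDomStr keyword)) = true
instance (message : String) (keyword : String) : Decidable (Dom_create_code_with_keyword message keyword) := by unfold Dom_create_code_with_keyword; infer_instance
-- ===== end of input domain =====

-- B rewrites A's five-stage word pipeline as one pass over the message with a mod-based key
-- counter (objective: simpler); equivalence is proved on Pre_, the inputs where A does not raise.

-- ===== PORT A =====
-- the module constant alph (ports work on List Char; PySem.Str.* are wrappers over PySem.Chars.* on .toList)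
def pvAlph : List Char := "abcdefghijklmnopqrstuvwxyz".toList

-- entries of A's heterogeneous lists: Python int or a non-letter character
inductive PvIC where
  | int : Int → PvIC
  | ch : Char → PvIC
deriving DecidableEq, Repr

def create_code_with_keyword (message : String) (keyword : String) : String :=
  -- for el in keyword: key_list.append(alph.find(el))
  let key_list : List Int :=
    keyword.toList.foldl (fun acc el => acc ++ [PySem.Chars.find pvAlph [el]]) []
  -- for word in message.split(' '): inner loop builds char_index, appended to words_indexs
  let words_indexs : List (List PvIC) :=
    (PySem.Chars.splitOn message.toList [' ']).foldl
      (fun acc word =>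
        acc ++ [word.foldl
          (fun ci el =>
            if PySem.Chars.isIn [el] pvAlph then ci ++ [PvIC.int (PySem.Chars.find pvAlph [el])]
            else ci ++ [PvIC.ch el]) []]) []
  -- key_list = 200*key_list
  let key_list2 : List Int := PySem.List.pyRepeat key_list 200
  -- shifting loop, threading r; key_list[r] raises IndexError when r is out of range —
  -- excluded by Pre_, the total form uses getD 0 there
  let st :=
    words_indexs.foldl
      (fun (st : List (List PvIC) × Int) i =>
        let st2 :=
          i.foldl
            (fun (st2 : List PvIC × Int) el =>
              match el with
              | PvIC.int n =>
                let k := (PySem.List.pyGet? key_list2 st2.2).getD 0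
                if n + k ≤ 26 - 1 then (st2.1 ++ [PvIC.int (n + k)], st2.2 + 1)
                else (st2.1 ++ [PvIC.int (n + k - 26 + 0)], st2.2 + 1)
              | PvIC.ch c => (st2.1 ++ [PvIC.ch c], st2.2))
            ([], st.2)
        (st.1 ++ [st2.1], st2.2))
      ([], 0)
  -- decoding loop; alph[i] here always has -1 ≤ i ≤ 25, so the getD default is never used;
  -- Python's dead `elif i == 0` branch (i is a str there, never 0) folds into the else
  let solved_list : List (List Char) :=
    st.1.foldl
      (fun acc lst =>
        acc ++ [lst.foldl
          (fun si el =>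
            match el with
            | PvIC.int n => si ++ [(PySem.List.pyGet? pvAlph n).getD ' ']
            | PvIC.ch c => si ++ [c]) []]) []
  -- final_list.append(''.join(i)) — ''.join of a list of chars is the char list itself
  let final_list : List (List Char) :=
    solved_list.foldl (fun acc i => acc ++ [i]) []
  String.ofList (PySem.Chars.join [' '] final_list)

-- ===== PORT B =====
def create_code_with_keyword_alt (message : String) (keyword : String) : String :=
  let kw := keyword.toList
  let st :=
    message.toList.foldl
      (fun (st : List Char × Int) c =>
        if PySem.Chars.isIn [c] pvAlph then
          -- keyword[r % len(keyword)] raises ZeroDivisionError when keyword = '' — excluded by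
          -- Pre_; the total form uses getD there
          let k := PySem.Chars.find pvAlph
            [(PySem.List.pyGet? kw (PySem.Int.mod st.2 (kw.length : Int))).getD ' ']
          (st.1 ++ [(PySem.List.pyGet? pvAlph (PySem.Int.mod (PySem.Chars.find pvAlph [c] + k) 26)).getD ' '],
           st.2 + 1)
        else (st.1 ++ [c], st.2))
      ([], 0)
  String.ofList st.1

-- ===== PRECONDITION & SPEC =====
-- Pre_ excludes exactly the inputs where A raises IndexError: more lowercase letters in the
-- message than the 200×keyword key list has entries (in particular any letter with keyword = '').
def Pre_create_code_with_keyword (message : String) (keyword : String) : Prop :=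
  (message.toList.filter (fun c => PySem.Chars.isIn [c] pvAlph)).length ≤ 200 * keyword.toList.length
instance (message : String) (keyword : String) : Decidable (Pre_create_code_with_keyword message keyword) := by
  unfold Pre_create_code_with_keyword; infer_instance

def pvWitness_create_code_with_keyword : String × String := ("hello world!", "key")

def Spec_create_code_with_keyword (message : String) (keyword : String) (out : String) : Prop := out = create_code_with_keyword_alt message keyword
instance (message : String) (keyword : String) (out : String) : Decidable (Spec_create_code_with_keyword message keyword out) := by unfold Spec_create_code_with_keyword; infer_instance

-- ===== CLAIM (what is proved, stated in full; the proofs are below) =====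
def Claim_equal_create_code_with_keyword : Prop := ∀ (message : String) (keyword : String), Dom_create_code_with_keyword message keyword → Pre_create_code_with_keyword message keyword → Spec_create_code_with_keyword message keyword (create_code_with_keyword message keyword)

-- ===== LEMMAS AND PROOFS =====

-- proof-side helpers
def pvIsL (c : Char) : Bool := PySem.Chars.isIn [c] pvAlph
def pvF (c : Char) : Int := PySem.Chars.find pvAlph [c]
def pvCnt (w : List Char) : Nat := (w.filter pvIsL).length
def pvEnc (c : Char) : PvIC := if pvIsL c then PvIC.int (pvF c) else PvIC.ch c
def pvDec (el : PvIC) : Char :=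
  match el with
  | PvIC.int n => (PySem.List.pyGet? pvAlph n).getD ' '
  | PvIC.ch c => c
def pvKey2 (kw : List Char) : List Int := PySem.List.pyRepeat (kw.map pvF) 200

def pvStepB (kw : List Char) (st : List Char × Int) (c : Char) : List Char × Int :=
  if PySem.Chars.isIn [c] pvAlph then
    let k := PySem.Chars.find pvAlph
      [(PySem.List.pyGet? kw (PySem.Int.mod st.2 (kw.length : Int))).getD ' ']
    (st.1 ++ [(PySem.List.pyGet? pvAlph (PySem.Int.mod (PySem.Chars.find pvAlph [c] + k) 26)).getD ' '], st.2 + 1)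
  else (st.1 ++ [c], st.2)

def pvStepA (key2 : List Int) (st2 : List PvIC × Int) (el : PvIC) : List PvIC × Int :=
  match el with
  | PvIC.int n =>
    let k := (PySem.List.pyGet? key2 st2.2).getD 0
    if n + k ≤ 26 - 1 then (st2.1 ++ [PvIC.int (n + k)], st2.2 + 1)
    else (st2.1 ++ [PvIC.int (n + k - 26 + 0)], st2.2 + 1)
  | PvIC.ch c => (st2.1 ++ [PvIC.ch c], st2.2)

def pvPW (kw : List Char) : List (List Char) → Nat → List (List Char)
  | [], _ => []
  | w :: t, r => (w.foldl (pvStepB kw) ([], (r : Int))).1 :: pvPW kw t (r + pvCnt w)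

-- ===== join/splitOn =====
lemma pv_join_cons (sep x : List Char) (t : List (List Char)) (h : t ≠ []) :
    PySem.Chars.join sep (x :: t) = x ++ sep ++ PySem.Chars.join sep t := by
  cases t with
  | nil => exact absurd rfl h
  | cons y r => exact PySem.Chars.join_cons_cons sep x y r

lemma pv_join_pair (xs : List (List Char)) (a b : List Char) :
    PySem.Chars.join [' '] (xs ++ [a ++ ' ' :: b]) = PySem.Chars.join [' '] (xs ++ [a, b]) := by
  induction xs with
  | nil => simp [PySem.Chars.join_singleton, PySem.Chars.join_cons_cons]
  | cons x t ih =>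
      rw [List.cons_append, List.cons_append,
        pv_join_cons _ _ _ (by simp), pv_join_cons _ _ _ (by simp), ih]

lemma pv_go : ∀ (fuel : Nat) (l cur : List Char) (acc : List (List Char)),
    PySem.Chars.join [' '] (PySem.Chars.splitOn.go [' '] fuel l cur acc)
      = PySem.Chars.join [' '] (acc.reverse ++ [cur.reverse ++ l]) := by
  intro fuel
  induction fuel with
  | zero => intro l cur acc; simp [PySem.Chars.splitOn.go]
  | succ n ih =>
    intro l cur acc
    cases l with
    | nil => simp [PySem.Chars.splitOn.go]
    | cons ch rest =>
      by_cases h : ch = ' '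
      · subst h
        have hgo : PySem.Chars.splitOn.go [' '] (n+1) (' ' :: rest) cur acc
            = PySem.Chars.splitOn.go [' '] n rest [] (cur.reverse :: acc) := by
          simp [PySem.Chars.splitOn.go, List.isPrefixOf]
        rw [hgo, ih]
        have e : (cur.reverse :: acc).reverse ++ [List.reverse [] ++ rest]
            = acc.reverse ++ [cur.reverse, rest] := by simp
        rw [e, ← pv_join_pair]
      · have hgo : PySem.Chars.splitOn.go [' '] (n+1) (ch :: rest) cur acc
            = PySem.Chars.splitOn.go [' '] n rest (ch :: cur) acc := by
          simp [PySem.Chars.splitOn.go, List.isPrefixOf, Ne.symm h]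
        rw [hgo, ih]
        simp

lemma pv_join_splitOn (s : List Char) :
    PySem.Chars.join [' '] (PySem.Chars.splitOn s [' ']) = s := by
  rw [PySem.Chars.splitOn, pv_go]
  simp [PySem.Chars.join_singleton]

-- ===== counting =====
lemma pv_isL_space : pvIsL ' ' = false := by decide

lemma pv_cnt_append (a b : List Char) : pvCnt (a ++ b) = pvCnt a + pvCnt b := by
  simp [pvCnt, List.filter_append]

lemma pv_cnt_join : ∀ ws : List (List Char),
    pvCnt (PySem.Chars.join [' '] ws) = (ws.map pvCnt).sum := by
  intro ws
  induction ws with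
  | nil => simp [PySem.Chars.join_nil, pvCnt]
  | cons w t ih =>
    cases t with
    | nil => simp [PySem.Chars.join_singleton]
    | cons y r =>
      rw [PySem.Chars.join_cons_cons, pv_cnt_append, pv_cnt_append, ih]
      simp [pvCnt, pv_isL_space]

-- ===== bounds on find =====
lemma pv_alph_len : pvAlph.length = 26 := by decide

lemma pv_neg_one_le_F (c : Char) : -1 ≤ pvF c := PySem.Chars.neg_one_le_find pvAlph [c]

lemma pv_F_le (c : Char) : pvF c ≤ 25 := by
  by_cases h : 0 ≤ pvF c
  · obtain ⟨t, ht⟩ := (PySem.Chars.find_spec (s := pvAlph) (sub := [c]) h).1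
    have hlen := congrArg List.length ht
    simp only [List.length_append, List.length_drop, pv_alph_len, List.length_cons,
      List.length_nil] at hlen
    have htn : pvF c = ((pvF c).toNat : Int) := (Int.toNat_of_nonneg h).symm
    rw [htn]
    have : (PySem.Chars.find pvAlph [c]).toNat = (pvF c).toNat := rfl
    omega
  · omega

lemma pv_F_nonneg {c : Char} (h : pvIsL c = true) : 0 ≤ pvF c := by
  rw [pvF, PySem.Chars.find_nonneg_iff]
  exact (PySem.Chars.isIn_iff_infix _ _).mp h

-- ===== the character table =====
lemma pv_char (s : Int) (h1 : -1 ≤ s) (h2 : s ≤ 50) :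
    (PySem.List.pyGet? pvAlph (if s ≤ 26 - 1 then s else s - 26 + 0)).getD ' '
      = (PySem.List.pyGet? pvAlph (PySem.Int.mod s 26)).getD ' ' := by
  interval_cases s <;> decide

-- ===== key agreement =====
lemma pv_flat {α : Type} (l : List α) :
    ∀ (n r : Nat), r < n * l.length →
      (List.flatten (List.replicate n l))[r]? = l[r % l.length]? := by
  intro n
  induction n with
  | zero => intro r h; omega
  | succ m ih =>
    intro r h
    have hs : (m + 1) * l.length = m * l.length + l.length := by ring
    rw [List.replicate_succ, List.flatten_cons]
    by_cases hr : r < l.length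
    · rw [List.getElem?_append_left hr, Nat.mod_eq_of_lt hr]
    · have hle : l.length ≤ r := by omega
      rw [List.getElem?_append_right hle, ih (r - l.length) (by omega),
        Nat.mod_eq_sub_mod hle]

lemma pv_key (kw : List Char) (r : Nat) (h : r < 200 * kw.length) :
    (PySem.List.pyGet? (pvKey2 kw) (r : Int)).getD 0
      = pvF ((PySem.List.pyGet? kw (PySem.Int.mod (r : Int) (kw.length : Int))).getD ' ') := by
  have hk : 0 < kw.length := by
    rcases Nat.eq_zero_or_pos kw.length with h0 | h0
    · rw [h0] at h; omega
    · exact h0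
  have hm : r % kw.length < kw.length := Nat.mod_lt _ hk
  rw [pvKey2, PySem.List.pyRepeat]
  rw [PySem.List.pyGet?_natCast]
  have h200 : ((200 : Int)).toNat = 200 := by decide
  rw [h200]
  rw [pv_flat (kw.map pvF) 200 r (by simp only [List.length_map]; exact h)]
  have : PySem.Int.mod (r : Int) (kw.length : Int) = ((r % kw.length : Nat) : Int) :=
    PySem.Int.mod_natCast r kw.length
  rw [this, PySem.List.pyGet?_natCast]
  rw [List.length_map]
  rw [List.getElem?_map]
  rw [List.getElem?_eq_getElem hm]
  simp

-- ===== shift lemmas =====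
lemma pv_stepB_out (kw : List Char) (st : List Char × Int) (c : Char) :
    pvStepB kw st c = (st.1 ++ (pvStepB kw ([], st.2) c).1, (pvStepB kw ([], st.2) c).2) := by
  rw [pvStepB, pvStepB]
  split <;> simp

lemma pv_shiftB (kw : List Char) :
    ∀ (l : List Char) (out : List Char) (r : Int),
      l.foldl (pvStepB kw) (out, r)
        = (out ++ (l.foldl (pvStepB kw) ([], r)).1, (l.foldl (pvStepB kw) ([], r)).2) := by
  intro l
  induction l with
  | nil => intro out r; simp
  | cons c t ih =>
    intro out r
    rw [List.foldl_cons, List.foldl_cons]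
    rw [pv_stepB_out kw (out, r) c]
    rw [ih ((out, r).1 ++ (pvStepB kw ([], r) c).1) (pvStepB kw ([], r) c).2]
    rw [ih (pvStepB kw ([], (r : Int)) c).1 (pvStepB kw ([], r) c).2]
    simp

lemma pv_stepA_out (key2 : List Int) (st : List PvIC × Int) (el : PvIC) :
    pvStepA key2 st el = (st.1 ++ (pvStepA key2 ([], st.2) el).1, (pvStepA key2 ([], st.2) el).2) := by
  cases el with
  | int n =>
    rw [pvStepA, pvStepA]
    simp only []
    split <;> simp
  | ch c => rfl

lemma pv_shiftA (key2 : List Int) :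
    ∀ (l : List PvIC) (out : List PvIC) (r : Int),
      l.foldl (pvStepA key2) (out, r)
        = (out ++ (l.foldl (pvStepA key2) ([], r)).1, (l.foldl (pvStepA key2) ([], r)).2) := by
  intro l
  induction l with
  | nil => intro out r; simp
  | cons c t ih =>
    intro out r
    rw [List.foldl_cons, List.foldl_cons]
    rw [pv_stepA_out key2 (out, r) c]
    rw [ih ((out, r).1 ++ (pvStepA key2 ([], r) c).1) (pvStepA key2 ([], r) c).2]
    rw [ih (pvStepA key2 ([], (r : Int)) c).1 (pvStepA key2 ([], r) c).2]
    simp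

lemma pv_B_snd (kw : List Char) :
    ∀ (l : List Char) (out : List Char) (r : Nat),
      (l.foldl (pvStepB kw) (out, (r : Int))).2 = ((r + pvCnt l : Nat) : Int) := by
  intro l
  induction l with
  | nil => intro out r; simp [pvCnt]
  | cons c t ih =>
    intro out r
    rw [List.foldl_cons]
    by_cases hc : PySem.Chars.isIn [c] pvAlph
    · have hstep : pvStepB kw (out, (r : Int)) c
          = ((pvStepB kw (out, (r : Int)) c).1, ((r + 1 : Nat) : Int)) := by
        rw [pvStepB]
        simp [hc]
      rw [hstep, ih]
      have : pvCnt (c :: t) = 1 + pvCnt t := by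
        simp [pvCnt, pvIsL, hc]
        omega
      rw [this]
      push_cast
      ring
    · have hstep : pvStepB kw (out, (r : Int)) c = (out ++ [c], (r : Int)) := by
        rw [pvStepB]
        simp [hc]
      rw [hstep, ih]
      have : pvCnt (c :: t) = pvCnt t := by
        simp [pvCnt, pvIsL, hc]
      rw [this]

lemma pv_stepA_int (key2 : List Int) (st : List PvIC × Int) (n : Int) :
    pvStepA key2 st (PvIC.int n)
      = (st.1 ++ [PvIC.int (if n + (PySem.List.pyGet? key2 st.2).getD 0 ≤ 26 - 1
            then n + (PySem.List.pyGet? key2 st.2).getD 0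
            else n + (PySem.List.pyGet? key2 st.2).getD 0 - 26 + 0)], st.2 + 1) := by
  rw [pvStepA]
  split
  next h => rfl
  next h => rfl

lemma pv_word (kw : List Char) :
    ∀ (w : List Char) (r : Nat), r + pvCnt w ≤ 200 * kw.length →
      (((w.map pvEnc).foldl (pvStepA (pvKey2 kw)) ([], (r : Int))).1).map pvDec
          = (w.foldl (pvStepB kw) ([], (r : Int))).1
        ∧ ((w.map pvEnc).foldl (pvStepA (pvKey2 kw)) ([], (r : Int))).2
          = ((r + pvCnt w : Nat) : Int) := by
  intro w
  induction w with
  | nil => intro r h; simp [pvCnt]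
  | cons c t ih =>
    intro r h
    by_cases hc : pvIsL c = true
    · have hcnt : pvCnt (c :: t) = pvCnt t + 1 := by
        simp [pvCnt, hc]
      have hrlt : r < 200 * kw.length := by omega
      rw [List.map_cons, List.foldl_cons, List.foldl_cons]
      rw [show pvEnc c = PvIC.int (pvF c) from by simp [pvEnc, hc]]
      rw [pv_stepA_int]
      rw [pv_key kw r hrlt]
      set k := pvF ((PySem.List.pyGet? kw (PySem.Int.mod (r : Int) (kw.length : Int))).getD ' ') with hkdef
      have hk1 : -1 ≤ k := pv_neg_one_le_F _
      have hk2 : k ≤ 25 := pv_F_le _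
      have hn1 : 0 ≤ pvF c := pv_F_nonneg hc
      have hn2 : pvF c ≤ 25 := pv_F_le c
      have hstepB : pvStepB kw ([], (r : Int)) c
          = ([(PySem.List.pyGet? pvAlph (PySem.Int.mod (pvF c + k) 26)).getD ' '], (r : Int) + 1) := by
        have hc' : PySem.Chars.isIn [c] pvAlph = true := hc
        rw [pvStepB]
        simp [hc', pvF, hkdef]
      rw [hstepB]
      rw [pv_shiftA, pv_shiftB]
      have hcast : ((r : Int) + 1) = ((r + 1 : Nat) : Int) := by push_cast; ring
      simp only [List.nil_append, hcast]
      obtain ⟨ih1, ih2⟩ := ih (r + 1) (by omega)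
      constructor
      · simp only [List.map_append, List.map_cons, List.map_nil, ih1]
        congr 1
        rw [show pvDec (PvIC.int (if pvF c + k ≤ 26 - 1 then pvF c + k else pvF c + k - 26 + 0))
              = (PySem.List.pyGet? pvAlph (if pvF c + k ≤ 26 - 1 then pvF c + k else pvF c + k - 26 + 0)).getD ' '
            from rfl]
        rw [pv_char (pvF c + k) (by omega) (by omega)]
      · simp only [ih2, hcnt]
        congr 1
        omega
    · have hcnt : pvCnt (c :: t) = pvCnt t := by
        simp [pvCnt, hc]
      have hencc : pvEnc c = PvIC.ch c := by simp [pvEnc, hc]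
      have hstepA : pvStepA (pvKey2 kw) ([], (r : Int)) (PvIC.ch c) = ([PvIC.ch c], (r : Int)) := rfl
      have hc' : PySem.Chars.isIn [c] pvAlph = false := by simpa [pvIsL] using hc
      have hstepB : pvStepB kw ([], (r : Int)) c = ([c], (r : Int)) := by
        rw [pvStepB]; simp [hc']
      rw [List.map_cons, List.foldl_cons, List.foldl_cons, hencc, hstepA, hstepB]
      rw [pv_shiftA, pv_shiftB]
      obtain ⟨ih1, ih2⟩ := ih r (by omega)
      constructor
      · simp only [List.map_append, List.map_cons, List.map_nil, ih1]
        rfl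
      · simp only [ih2, hcnt]

lemma pv_A_words (kw : List Char) :
    ∀ (ws : List (List Char)) (acc : List (List PvIC)) (r : Nat),
      r + (ws.map pvCnt).sum ≤ 200 * kw.length →
      ((ws.map (fun w => w.map pvEnc)).foldl
          (fun (st : List (List PvIC) × Int) i =>
            (st.1 ++ [(i.foldl (pvStepA (pvKey2 kw)) ([], st.2)).1],
             (i.foldl (pvStepA (pvKey2 kw)) ([], st.2)).2))
          (acc, (r : Int))).1.map (fun l => l.map pvDec)
        = acc.map (fun l => l.map pvDec) ++ pvPW kw ws r := by
  intro ws
  induction ws with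
  | nil => intro acc r h; simp [pvPW]
  | cons w t ih =>
    intro acc r h
    have hsum : r + pvCnt w + (t.map pvCnt).sum ≤ 200 * kw.length := by
      simp only [List.map_cons, List.sum_cons] at h; omega
    obtain ⟨w1, w2⟩ := pv_word kw w r (by omega)
    rw [List.map_cons, List.foldl_cons]
    simp only []
    rw [w2]
    rw [ih (acc ++ [((w.map pvEnc).foldl (pvStepA (pvKey2 kw)) ([], (r : Int))).1])
        (r + pvCnt w) (by omega)]
    rw [pvPW]
    simp [w1]

lemma pv_stepB_space (kw : List Char) (st : List Char × Int) :
    pvStepB kw st ' ' = (st.1 ++ [' '], st.2) := by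
  rw [pvStepB]
  simp [show PySem.Chars.isIn [' '] pvAlph = false from by decide]

lemma pv_B_words (kw : List Char) :
    ∀ (ws : List (List Char)) (out : List Char) (r : Nat),
      ((PySem.Chars.join [' '] ws).foldl (pvStepB kw) (out, (r : Int))).1
        = out ++ PySem.Chars.join [' '] (pvPW kw ws r) := by
  intro ws
  induction ws with
  | nil => intro out r; simp [PySem.Chars.join_nil, pvPW]
  | cons w t ih =>
    intro out r
    cases t with
    | nil =>
      rw [PySem.Chars.join_singleton, pv_shiftB, pvPW, pvPW, PySem.Chars.join_singleton]
    | cons y u =>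
      rw [PySem.Chars.join_cons_cons]
      rw [show w ++ [' '] ++ PySem.Chars.join [' '] (y :: u)
            = w ++ (' ' :: PySem.Chars.join [' '] (y :: u)) from by simp]
      rw [List.foldl_append, List.foldl_cons]
      rw [pv_stepB_space]
      rw [pv_B_snd kw w out r]
      rw [pv_shiftB kw w out (r : Int)]
      simp only []
      rw [ih (out ++ (List.foldl (pvStepB kw) ([], (r : Int)) w).1 ++ [' ']) (r + pvCnt w)]
      have hne : pvPW kw (y :: u) (r + pvCnt w) ≠ [] := by
        rw [pvPW]; exact List.cons_ne_nil _ _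
      rw [show pvPW kw (w :: y :: u) r
            = (List.foldl (pvStepB kw) ([], (r : Int)) w).1 :: pvPW kw (y :: u) (r + pvCnt w)
          from rfl]
      rw [pv_join_cons _ _ _ hne]
      simp

lemma pv_B_eq (m kw : String) :
    create_code_with_keyword_alt m kw
      = String.ofList ((m.toList.foldl (pvStepB kw.toList) ([], 0)).1) := rfl

lemma pv_A_eq (m kw : String) (h : Pre_create_code_with_keyword m kw) :
    create_code_with_keyword m kw
      = String.ofList (PySem.Chars.join [' ']
          (pvPW kw.toList (PySem.Chars.splitOn m.toList [' ']) 0)) := by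
  have hkey : List.foldl (fun acc el => acc ++ [PySem.Chars.find pvAlph [el]]) ([] : List Int) kw.toList
      = kw.toList.map pvF := by
    rw [PySem.List.foldl_append_singleton_eq_map]
    simp only [List.nil_append]
    rfl
  have hinner : ∀ w : List Char,
      w.foldl (fun ci el =>
        if PySem.Chars.isIn [el] pvAlph then ci ++ [PvIC.int (PySem.Chars.find pvAlph [el])]
        else ci ++ [PvIC.ch el]) [] = w.map pvEnc := by
    intro w
    rw [show (fun ci el =>
        if PySem.Chars.isIn [el] pvAlph then ci ++ [PvIC.int (PySem.Chars.find pvAlph [el])]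
        else ci ++ [PvIC.ch el]) = fun (ci : List PvIC) el => ci ++ [pvEnc el] from by
      funext ci el
      by_cases hel : PySem.Chars.isIn [el] pvAlph <;> simp [pvEnc, pvIsL, pvF, hel]]
    rw [PySem.List.foldl_append_singleton_eq_map]
    simp
  have hwords : ∀ ws : List (List Char),
      ws.foldl (fun acc word => acc ++ [List.map pvEnc word]) []
        = ws.map (fun w => w.map pvEnc) := by
    intro ws
    rw [PySem.List.foldl_append_singleton_eq_map]
    simp
  have hdecf : List.foldl (fun si el =>
        match el with
        | PvIC.int n => si ++ [(PySem.List.pyGet? pvAlph n).getD ' ']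
        | PvIC.ch c => si ++ [c]) ([] : List Char)
      = List.map pvDec := by
    funext lst
    rw [show (fun si el =>
        match el with
        | PvIC.int n => si ++ [(PySem.List.pyGet? pvAlph n).getD ' ']
        | PvIC.ch c => si ++ [c]) = fun (si : List Char) el => si ++ [pvDec el] from by
      funext si el
      cases el <;> rfl]
    rw [PySem.List.foldl_append_singleton_eq_map]
    simp
  have hsolved : ∀ ll : List (List PvIC),
      ll.foldl (fun acc lst => acc ++ [List.map pvDec lst]) []
        = ll.map (fun lst => List.map pvDec lst) := by
    intro ll
    rw [PySem.List.foldl_append_singleton_eq_map]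
    simp
  have hfinal : ∀ l : List (List Char),
      l.foldl (fun acc (i : List Char) => acc ++ [i]) [] = l := by
    intro l
    rw [PySem.List.foldl_append_singleton_eq_self]
    simp
  have hsum : (0 : Nat) + (((PySem.Chars.splitOn m.toList [' ']).map pvCnt).sum)
      ≤ 200 * kw.toList.length := by
    have h1 := pv_cnt_join (PySem.Chars.splitOn m.toList [' '])
    rw [pv_join_splitOn] at h1
    have h2 : pvCnt m.toList ≤ 200 * kw.toList.length := h
    omega
  unfold create_code_with_keyword
  simp only [hkey, hinner, hwords, hdecf, hsolved, hfinal]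
  show String.ofList (PySem.Chars.join [' ']
      (List.map (fun lst => List.map pvDec lst)
        ((((PySem.Chars.splitOn m.toList [' ']).map (fun w => w.map pvEnc)).foldl
            (fun (st : List (List PvIC) × Int) i =>
              (st.1 ++ [(i.foldl (pvStepA (pvKey2 kw.toList)) ([], st.2)).1],
               (i.foldl (pvStepA (pvKey2 kw.toList)) ([], st.2)).2))
            ([], ((0 : Nat) : Int))).1))) = _
  rw [pv_A_words kw.toList (PySem.Chars.splitOn m.toList [' ']) [] 0 hsum]
  simp

theorem pv_main : ∀ (message keyword : String),
    Pre_create_code_with_keyword message keyword →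
    create_code_with_keyword message keyword = create_code_with_keyword_alt message keyword := by
  intro m kw h
  rw [pv_A_eq m kw h, pv_B_eq]
  rw [← pv_join_splitOn m.toList]
  rw [show (0 : Int) = ((0 : Nat) : Int) from rfl]
  rw [pv_B_words kw.toList (PySem.Chars.splitOn m.toList [' ']) [] 0]
  rw [pv_join_splitOn m.toList]
  rw [List.nil_append]

-- ===== VERDICT (by name: the statement is the Claim_ definition above) =====
theorem create_code_with_keyword_spec : Claim_equal_create_code_with_keyword := by
  intro m k _ hpre
  unfold Spec_create_code_with_keyword
  exact pv_main m k hpre
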